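-- pv_equiv track=rewrite | github.com/allisnone/tradeStrategy | latest.py | find_boduan
-- ===== SOURCE A (Python) =====
-- def find_boduan(data_list):
--     indx=0
--     count=len(data_list)
--     max=data_list[0]
--     min=data_list[0]
--     split_list=[]
--     split_list.append(max)
--     indx=1
--     action=''
--     if data_list[0]>data_list[1]:
--         action='find_min'
--     else:
--         action='find_max'
--     lst_value=data_list[(count-1)]
--     while indx<(count-1) and indx>=1:
--         value=data_list[indx]
--         #print value,action,indx
--         if action=='find_max':
--             #print min,max
--             if value>=max:
--                 max=value
--                 action='find_max'
--             else:
--                 last_value=data_list[indx-1]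
--                 min=value
--                 max=last_value
--                 split_list.append(last_value)
--                 action='find_min'
--                 pass
--         else:
--             if action=='find_min':
--                 #print min,max
--                 if value<=min:
--                     min=value
--                     action='find_min'
--                 else:
--                     last_value=data_list[indx-1]
--                     max=value
--                     min=last_value
--                     split_list.append(last_value)
--                     action='find_max'
--                     pass
--             else:
--                 pass
--         indx=indx+1
--     split_list.append(lst_value)
--     return split_list
-- ===== SOURCE B (Python) =====
-- def find_boduan(data_list):
--     n = len(data_list)
--     init = data_list[1] >= data_list[0]
--     moves = [(i, data_list[i] > data_list[i - 1])
--              for i in range(1, n - 1) if data_list[i] != data_list[i - 1]]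
--     signs = [init] + [s for _, s in moves]
--     turns = [data_list[i - 1] for (i, s), p in zip(moves, signs) if s != p]
--     return [data_list[0]] + turns + [data_list[-1]]
-- ===== Notes on version B (the rewrite author's own statement) =====
-- stated objective: alternative
-- what changed: Replaces A's stateful scan with running max/min accumulators and 'find_max'/'find_min' action strings by a stateless staged pipeline: filter the equal-neighbour steps out into a list of signed moves, prepend the initial direction, and read the turning points off with a zip-adjacent comprehension where consecutive move signs disagree.
import Mathlib
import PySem

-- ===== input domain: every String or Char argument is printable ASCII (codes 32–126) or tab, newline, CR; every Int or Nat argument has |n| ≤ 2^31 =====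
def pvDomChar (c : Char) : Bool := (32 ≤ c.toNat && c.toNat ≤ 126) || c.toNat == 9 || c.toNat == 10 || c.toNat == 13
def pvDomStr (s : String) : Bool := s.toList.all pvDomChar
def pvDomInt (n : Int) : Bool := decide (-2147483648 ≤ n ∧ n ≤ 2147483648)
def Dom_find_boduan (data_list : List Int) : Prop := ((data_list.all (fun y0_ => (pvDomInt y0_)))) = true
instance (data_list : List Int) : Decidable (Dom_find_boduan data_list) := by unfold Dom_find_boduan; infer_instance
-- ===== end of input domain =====

-- B replaces A's stateful scan (running max/min accumulators, 'find_max'/'find_min' action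
-- strings) by a stateless staged pipeline: filter equal-neighbour steps into signed moves,
-- prepend the initial direction, and read turning points off a zip of adjacent move signs.
-- Equivalence on lists of length >= 2 (A raises IndexError otherwise).

-- ===== PORT A =====
-- loop body of A's while loop, state = (max, min, action, split_list); indices are in range on Pre_
def pvStepA (data_list : List Int) (st : Int × Int × String × List Int) (indx : Nat) :
    Int × Int × String × List Int :=
  let maxv := st.1
  let minv := st.2.1
  let action := st.2.2.1
  let split := st.2.2.2
  let value := data_list.getD indx 0
  if action = "find_max" then
    if value ≥ maxv then (value, minv, "find_max", split)
    else
      let last_value := data_list.getD (indx - 1) 0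
      (last_value, value, "find_min", split ++ [last_value])
  else if action = "find_min" then
    if value ≤ minv then (maxv, value, "find_min", split)
    else
      let last_value := data_list.getD (indx - 1) 0
      (value, last_value, "find_max", split ++ [last_value])
  else st

def find_boduan (data_list : List Int) : List Int :=
  let count := data_list.length
  let maxv := data_list.getD 0 0
  let minv := data_list.getD 0 0
  let split_list := [maxv]
  let action := if data_list.getD 0 0 > data_list.getD 1 0 then "find_min" else "find_max"
  let lst_value := data_list.getD (count - 1) 0
  let final := (List.range' 1 (count - 2)).foldl (pvStepA data_list) (maxv, minv, action, split_list)
  final.2.2.2 ++ [lst_value]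

-- ===== PORT B =====
def find_boduan_alt (data_list : List Int) : List Int :=
  let n := data_list.length
  let init := decide (data_list.getD 1 0 ≥ data_list.getD 0 0)
  let moves := ((List.range' 1 (n - 2)).filter
      (fun i => data_list.getD i 0 != data_list.getD (i - 1) 0)).map
      (fun i => (i, decide (data_list.getD i 0 > data_list.getD (i - 1) 0)))
  let signs := init :: moves.map Prod.snd
  let turns := ((moves.zip signs).filter (fun q => q.1.2 != q.2)).map
      (fun q => data_list.getD (q.1.1 - 1) 0)
  [data_list.getD 0 0] ++ turns ++ [data_list.getD (n - 1) 0]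

-- ===== PRECONDITION & SPEC =====
-- A unconditionally indexes the first two elements, so it raises IndexError on lists shorter
-- than 2; exactly those inputs are excluded (B raises there too).
def Pre_find_boduan (data_list : List Int) : Prop := 2 ≤ data_list.length
instance (data_list : List Int) : Decidable (Pre_find_boduan data_list) := by
  unfold Pre_find_boduan; infer_instance
def pvWitness_find_boduan : List Int := [3, 1, 4, 1, 5]

def Spec_find_boduan (data_list : List Int) (out : List Int) : Prop := out = find_boduan_alt data_list
instance (data_list : List Int) (out : List Int) : Decidable (Spec_find_boduan data_list out) := by
  unfold Spec_find_boduan; infer_instance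

-- ===== CLAIM (what is proved, stated in full; the proofs are below) =====
def Claim_equal_find_boduan : Prop := ∀ (data_list : List Int), Dom_find_boduan data_list → Pre_find_boduan data_list → Spec_find_boduan data_list (find_boduan data_list)

-- ===== LEMMAS AND PROOFS =====

-- proof-only intermediate: a one-flag scan, bridging A's foldl and B's pipeline
def pvStepB (data_list : List Int) (st : Bool × List Int) (i : Nat) : Bool × List Int :=
  if st.1 = true ∧ data_list.getD i 0 < data_list.getD (i - 1) 0 then
    (false, st.2 ++ [data_list.getD (i - 1) 0])
  else if st.1 = false ∧ data_list.getD i 0 > data_list.getD (i - 1) 0 then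
    (true, st.2 ++ [data_list.getD (i - 1) 0])
  else st

-- proof-only intermediate: recursive reading of B's zip-adjacent stage
def pvTurns (d : List Int) : List (Nat × Bool) → Bool → List Int
  | [], _ => []
  | (i, s) :: ms, p => if s ≠ p then d.getD (i - 1) 0 :: pvTurns d ms s else pvTurns d ms s

-- Invariant: A's action string mirrors the scan's flag, the emitted lists coincide, and the
-- tracked extremum (max while finding max, min while finding min) equals the previous element.
lemma pv_loop_eq (data_list : List Int) (k : Nat) :
    ∀ (start : Nat) (maxv minv : Int) (up : Bool) (out : List Int),
      (cond up (maxv = data_list.getD (start - 1) 0) (minv = data_list.getD (start - 1) 0)) →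
      ((List.range' start k).foldl (pvStepA data_list)
          (maxv, minv, cond up "find_max" "find_min", out)).2.2.2
        = ((List.range' start k).foldl (pvStepB data_list) (up, out)).2 := by
  induction k with
  | zero => intro start maxv minv up out _; simp
  | succ k ih =>
    intro start maxv minv up out hinv
    rw [List.range'_succ]
    simp only [List.foldl_cons]
    cases up with
    | true =>
      simp only [cond_true] at hinv ⊢
      subst hinv
      by_cases h : data_list.getD start 0 ≥ data_list.getD (start - 1) 0
      · have hB : pvStepB data_list (true, out) start = (true, out) := by
          simp only [pvStepB, List.getD] at h ⊢
          rw [if_neg (by rintro ⟨-, hlt⟩; omega), if_neg (by rintro ⟨hc, -⟩; simp at hc)]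
        have hA : pvStepA data_list (data_list.getD (start - 1) 0, minv, "find_max", out) start
            = (data_list.getD start 0, minv, "find_max", out) := by
          simp only [pvStepA]
          rw [if_pos trivial, if_pos h]
        rw [hA, hB]
        have := ih (start + 1) (data_list.getD start 0) minv true out (by simp)
        simpa using this
      · have hB : pvStepB data_list (true, out) start
            = (false, out ++ [data_list.getD (start - 1) 0]) := by
          simp only [pvStepB, List.getD] at h ⊢
          rw [if_pos ⟨trivial, by omega⟩]
        have hA : pvStepA data_list (data_list.getD (start - 1) 0, minv, "find_max", out) start
            = (data_list.getD (start - 1) 0, data_list.getD start 0, "find_min",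
               out ++ [data_list.getD (start - 1) 0]) := by
          simp only [pvStepA]
          rw [if_pos trivial, if_neg h]
        rw [hA, hB]
        have := ih (start + 1) (data_list.getD (start - 1) 0) (data_list.getD start 0) false
          (out ++ [data_list.getD (start - 1) 0]) (by simp)
        simpa using this
    | false =>
      simp only [cond_false] at hinv ⊢
      subst hinv
      by_cases h : data_list.getD start 0 ≤ data_list.getD (start - 1) 0
      · have hB : pvStepB data_list (false, out) start = (false, out) := by
          simp only [pvStepB, List.getD] at h ⊢
          rw [if_neg (by rintro ⟨hc, -⟩; simp at hc), if_neg (by rintro ⟨-, hlt⟩; omega)]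
        have hA : pvStepA data_list (maxv, data_list.getD (start - 1) 0, "find_min", out) start
            = (maxv, data_list.getD start 0, "find_min", out) := by
          simp only [pvStepA]
          rw [if_neg (show ¬("find_min" = "find_max") by decide), if_pos trivial, if_pos h]
        rw [hA, hB]
        have := ih (start + 1) maxv (data_list.getD start 0) false out (by simp)
        simpa using this
      · have hB : pvStepB data_list (false, out) start
            = (true, out ++ [data_list.getD (start - 1) 0]) := by
          simp only [pvStepB, List.getD] at h ⊢
          rw [if_neg (by rintro ⟨-, hlt⟩; omega), if_pos ⟨trivial, by omega⟩]
        have hA : pvStepA data_list (maxv, data_list.getD (start - 1) 0, "find_min", out) start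
            = (data_list.getD start 0, data_list.getD (start - 1) 0, "find_max",
               out ++ [data_list.getD (start - 1) 0]) := by
          simp only [pvStepA]
          rw [if_neg (show ¬("find_min" = "find_max") by decide), if_pos trivial, if_neg h]
        rw [hA, hB]
        have := ih (start + 1) (data_list.getD start 0) (data_list.getD (start - 1) 0) true
          (out ++ [data_list.getD (start - 1) 0]) (by simp)
        simpa using this

-- The scan, read off as B's stage-1/stage-2 pipeline (recursive form of the zip stage)
lemma pv_scan_turns (d : List Int) :
    ∀ (L : List Nat) (up : Bool) (out : List Int),
      ((L.foldl (pvStepB d) (up, out)).2)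
        = out ++ pvTurns d ((L.filter (fun i => d.getD i 0 != d.getD (i - 1) 0)).map
            (fun i => (i, decide (d.getD i 0 > d.getD (i - 1) 0)))) up := by
  intro L
  induction L with
  | nil => intro up out; simp [pvTurns]
  | cons i L' ih =>
    intro up out
    simp only [List.foldl_cons, List.filter_cons]
    by_cases heq : d.getD i 0 = d.getD (i - 1) 0
    · have hc : (d.getD i 0 != d.getD (i - 1) 0) = false := by
        rw [bne_eq_false_iff_eq]; exact heq
      rw [hc]
      simp only [Bool.false_eq_true, if_false]
      have hstep : pvStepB d (up, out) i = (up, out) := by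
        simp only [pvStepB]
        rw [if_neg (by rintro ⟨-, h⟩; omega), if_neg (by rintro ⟨-, h⟩; omega)]
      rw [hstep]; exact ih up out
    · have hc : (d.getD i 0 != d.getD (i - 1) 0) = true := by
        rw [bne_iff_ne]; exact heq
      rw [hc]
      simp only [if_true, List.map_cons]
      by_cases hgt : d.getD i 0 > d.getD (i - 1) 0
      · rw [decide_eq_true hgt]
        cases up with
        | true =>
          have hstep : pvStepB d (true, out) i = (true, out) := by
            simp only [pvStepB]
            rw [if_neg (by rintro ⟨-, h⟩; omega), if_neg (by rintro ⟨h, -⟩; simp at h)]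
          rw [hstep, ih]
          simp [pvTurns]
        | false =>
          have hstep : pvStepB d (false, out) i = (true, out ++ [d.getD (i - 1) 0]) := by
            simp only [pvStepB]
            rw [if_neg (by rintro ⟨h, -⟩; simp at h), if_pos ⟨trivial, hgt⟩]
          rw [hstep, ih]
          simp [pvTurns]
      · have hlt : d.getD i 0 < d.getD (i - 1) 0 := by omega
        rw [decide_eq_false hgt]
        cases up with
        | true =>
          have hstep : pvStepB d (true, out) i = (false, out ++ [d.getD (i - 1) 0]) := by
            simp only [pvStepB]
            rw [if_pos ⟨trivial, hlt⟩]
          rw [hstep, ih]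
          simp [pvTurns]
        | false =>
          have hstep : pvStepB d (false, out) i = (false, out) := by
            simp only [pvStepB]
            rw [if_neg (by rintro ⟨h, -⟩; simp at h), if_neg (by rintro ⟨-, h⟩; omega)]
          rw [hstep, ih]
          simp [pvTurns]

-- B's zip-adjacent stage computes exactly the recursive pvTurns
lemma pv_turns_zip (d : List Int) :
    ∀ (ms : List (Nat × Bool)) (p : Bool),
      (((ms.zip (p :: ms.map Prod.snd)).filter (fun q => q.1.2 != q.2)).map
          (fun q => d.getD (q.1.1 - 1) 0)) = pvTurns d ms p := by
  intro ms
  induction ms with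
  | nil => intro p; simp [pvTurns]
  | cons m rest ih =>
    intro p
    obtain ⟨i, s⟩ := m
    simp only [List.map_cons, List.zip_cons_cons, List.filter_cons]
    by_cases h : s = p
    · subst h
      simp only [bne_self_eq_false, Bool.false_eq_true, if_false]
      rw [ih s]
      simp [pvTurns]
    · have hb : (s != p) = true := by rw [bne_iff_ne]; exact h
      simp only [hb, if_true, List.map_cons]
      rw [ih s]
      simp [pvTurns, h]

-- ===== VERDICT (by name: the statement is the Claim_ definition above) =====
theorem find_boduan_spec : Claim_equal_find_boduan := by
  intro data_list _ _
  unfold Spec_find_boduan find_boduan find_boduan_alt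
  have hact : (if data_list.getD 0 0 > data_list.getD 1 0 then "find_min" else "find_max")
      = cond (decide (data_list.getD 1 0 ≥ data_list.getD 0 0)) "find_max" "find_min" := by
    by_cases h : data_list.getD 0 0 > data_list.getD 1 0
    · rw [if_pos h, decide_eq_false (by omega), cond_false]
    · rw [if_neg h, decide_eq_true (by omega), cond_true]
  simp only [hact]
  rw [pv_loop_eq data_list (data_list.length - 2) 1
    (data_list.getD 0 0) (data_list.getD 0 0)
    (decide (data_list.getD 1 0 ≥ data_list.getD 0 0)) [data_list.getD 0 0]
    (by cases h : (decide (data_list.getD 1 0 ≥ data_list.getD 0 0) : Bool) <;> simp)]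
  rw [pv_scan_turns, pv_turns_zip]
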